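-- pv_equiv track=rewrite | github.com/SamJoan/advent-of-code-2023 | 12/main.py | parse_spring_groups
-- ===== SOURCE A (Python) =====
-- def parse_spring_groups(springs):
--     result = []
--     damaged_group_size = 0
--     for c in springs:
--         if c == '#':
--             damaged_group_size += 1
--         else:
--             if damaged_group_size != 0:
--                 result.append(str(damaged_group_size))
--                 damaged_group_size = 0
--
--     if damaged_group_size > 0:
--         result.append(str(damaged_group_size))
--
--     result_str = ','.join(result)
--     return result_str
-- ===== SOURCE B (Python) =====
-- import re
--
-- def parse_spring_groups(springs):
--     return ','.join(str(len(g)) for g in re.findall(r'#+', springs))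
-- ===== Notes on version B (the rewrite author's own statement) =====
-- stated objective: idiomatic
-- what changed: B extracts the maximal '#'-runs with re.findall and then joins their lengths, instead of A's inline counter/flush accumulator loop.
import Mathlib
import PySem

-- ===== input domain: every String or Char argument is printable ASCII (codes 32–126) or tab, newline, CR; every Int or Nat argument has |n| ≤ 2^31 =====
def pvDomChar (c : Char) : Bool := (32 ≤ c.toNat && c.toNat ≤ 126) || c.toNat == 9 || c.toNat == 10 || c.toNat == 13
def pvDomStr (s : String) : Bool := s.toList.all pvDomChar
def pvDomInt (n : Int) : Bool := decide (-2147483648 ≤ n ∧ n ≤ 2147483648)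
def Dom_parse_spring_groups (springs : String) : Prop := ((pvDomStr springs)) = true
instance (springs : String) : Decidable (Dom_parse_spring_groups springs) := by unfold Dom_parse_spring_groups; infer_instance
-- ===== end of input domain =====

-- B extracts the maximal '#'-runs first and then measures them (regex-style), instead of A's
-- inline counter/flush accumulator loop; objective: idiomatic, same cost.

-- ===== PORT A =====
def parse_spring_groups (springs : String) : String :=
  let st := springs.toList.foldl
    (fun (st : List String × Int) c =>
      if c = '#' then (st.1, st.2 + 1)
      else if st.2 ≠ 0 then (st.1 ++ [PySem.Int.toStr st.2], 0) else st)
    ([], 0)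
  let result := if st.2 > 0 then st.1 ++ [PySem.Int.toStr st.2] else st.1
  PySem.Str.join "," result

-- ===== PORT B =====
-- re.findall(r'#+', springs): the maximal runs of '#', left to right
def pvHashRuns : List Char → List (List Char)
  | [] => []
  | c :: cs =>
    if c = '#' then
      (c :: cs.takeWhile (· = '#')) :: pvHashRuns (cs.dropWhile (· = '#'))
    else pvHashRuns cs
termination_by l => l.length
decreasing_by
  · exact Nat.lt_succ_of_le (List.length_dropWhile_le _ _)
  · simp

def parse_spring_groups_alt (springs : String) : String :=
  PySem.Str.join "," ((pvHashRuns springs.toList).map (fun g => PySem.Int.toStr (g.length : Int)))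

-- ===== PRECONDITION & SPEC =====
def Spec_parse_spring_groups (springs : String) (out : String) : Prop := out = parse_spring_groups_alt springs
instance (springs : String) (out : String) : Decidable (Spec_parse_spring_groups springs out) := by unfold Spec_parse_spring_groups; infer_instance

-- ===== CLAIM (what is proved, stated in full; the proofs are below) =====
def Claim_equal_parse_spring_groups : Prop := ∀ (springs : String), Dom_parse_spring_groups springs → Spec_parse_spring_groups springs (parse_spring_groups springs)

-- ===== LEMMAS AND PROOFS =====

-- A's loop body and its final flush, named for the proofs (definitionally equal to port A's code)
def pvStep (st : List String × Int) (c : Char) : List String × Int :=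
  if c = '#' then (st.1, st.2 + 1)
  else if st.2 ≠ 0 then (st.1 ++ [PySem.Int.toStr st.2], 0) else st

def pvFinish (st : List String × Int) : List String :=
  if st.2 > 0 then st.1 ++ [PySem.Int.toStr st.2] else st.1

-- the group-size strings A's loop emits from counter state `cnt` onwards
def pvTail (cnt : Int) : List Char → List String
  | [] => if cnt > 0 then [PySem.Int.toStr cnt] else []
  | c :: cs =>
    if c = '#' then pvTail (cnt + 1) cs
    else if cnt ≠ 0 then PySem.Int.toStr cnt :: pvTail 0 cs else pvTail 0 cs

theorem pvFold_eq_tail (l : List Char) : ∀ (res : List String) (cnt : Int),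
    pvFinish (l.foldl pvStep (res, cnt)) = res ++ pvTail cnt l := by
  induction l with
  | nil =>
    intro res cnt
    simp only [List.foldl_nil, pvFinish, pvTail]
    split_ifs <;> simp
  | cons c cs ih =>
    intro res cnt
    simp only [List.foldl_cons, pvStep, pvTail]
    split_ifs with h1 h2
    · exact ih res (cnt + 1)
    · rw [ih (res ++ [PySem.Int.toStr cnt]) 0]; simp
    · obtain rfl : cnt = 0 := not_not.mp h2
      exact ih res 0

theorem pvTail_pos (l : List Char) : ∀ (cnt : Int), 0 < cnt →
    pvTail cnt l = PySem.Int.toStr (cnt + (l.takeWhile (· = '#')).length)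
      :: pvTail 0 (l.dropWhile (· = '#')) := by
  induction l with
  | nil => intro cnt h; simp [pvTail, h]
  | cons c cs ih =>
    intro cnt h
    by_cases hc : c = '#'
    · subst hc
      rw [show pvTail cnt ('#' :: cs) = pvTail (cnt + 1) cs from by simp [pvTail]]
      rw [ih (cnt + 1) (by omega)]
      rw [show List.takeWhile (· = '#') ('#' :: cs) = '#' :: List.takeWhile (· = '#') cs from by
        simp]
      rw [show List.dropWhile (· = '#') ('#' :: cs) = List.dropWhile (· = '#') cs from by simp]
      simp only [List.length_cons]
      congr 2
      push_cast; omega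
    · rw [show pvTail cnt (c :: cs) = PySem.Int.toStr cnt :: pvTail 0 cs from by
        simp [pvTail, hc, show cnt ≠ 0 from by omega]]
      rw [show List.takeWhile (· = '#') (c :: cs) = [] from by simp [hc]]
      rw [show List.dropWhile (· = '#') (c :: cs) = c :: cs from by simp [hc]]
      rw [show pvTail 0 (c :: cs) = pvTail 0 cs from by simp [pvTail, hc]]
      simp

theorem pvTail_zero_eq_runs (n : Nat) : ∀ (l : List Char), l.length ≤ n →
    pvTail 0 l = (pvHashRuns l).map (fun g => PySem.Int.toStr (g.length : Int)) := by
  induction n with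
  | zero =>
    intro l hl
    obtain rfl : l = [] := List.eq_nil_of_length_eq_zero (Nat.le_zero.mp hl)
    simp [pvTail, pvHashRuns]
  | succ n ih =>
    intro l hl
    cases l with
    | nil => simp [pvTail, pvHashRuns]
    | cons c cs =>
      by_cases hc : c = '#'
      · subst hc
        rw [show pvTail 0 ('#' :: cs) = pvTail 1 cs from by simp [pvTail]]
        rw [pvTail_pos cs 1 (by omega)]
        rw [ih _ (le_trans (List.length_dropWhile_le _ _) (Nat.le_of_succ_le_succ hl))]
        rw [show pvHashRuns ('#' :: cs)
              = ('#' :: cs.takeWhile (· = '#')) :: pvHashRuns (cs.dropWhile (· = '#')) from by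
          simp [pvHashRuns]]
        simp only [List.map_cons, List.length_cons]
        congr 2
        push_cast; omega
      · rw [show pvTail 0 (c :: cs) = pvTail 0 cs from by simp [pvTail, hc]]
        rw [show pvHashRuns (c :: cs) = pvHashRuns cs from by simp [pvHashRuns, hc]]
        exact ih cs (Nat.le_of_succ_le_succ hl)

-- ===== VERDICT (by name: the statement is the Claim_ definition above) =====
theorem parse_spring_groups_spec : Claim_equal_parse_spring_groups := by
  intro springs _
  unfold Spec_parse_spring_groups
  have hA : parse_spring_groups springs
      = PySem.Str.join "," (pvFinish (springs.toList.foldl pvStep ([], 0))) := rfl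
  rw [hA, pvFold_eq_tail, pvTail_zero_eq_runs springs.toList.length _ le_rfl]
  simp [parse_spring_groups_alt]
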